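-- pv_equiv track=rewrite | github.com/thecodearrow/InterviewBit-Python-Solutions | Trees/Hotel Reviews.py | solve
-- ===== SOURCE A (Python) =====
-- def solve(A, B):
--     keys=A.split("_")
--     keywords=set()
--     for k in keys:
--         keywords.add(k)
--
--     good_reviews=[]
--     for i,word in enumerate(B):
--         score=0
--         for w in word.split("_"):
--             if(w in keywords):
--                 score+=1
--         good_reviews.append([i,score])
--
--     good_reviews=sorted(good_reviews,key=lambda x:x[1],reverse=True)
--
--     review_order=[]
--     for idx,score in good_reviews:
--         review_order.append(idx)
--
--     return review_order
-- ===== SOURCE B (Python) =====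
-- def solve(A, B):
--     keywords = set(A.split("_"))
--     scores = [sum(w in keywords for w in review.split("_")) for review in B]
--     top = max(scores, default=0)
--     buckets = [[] for _ in range(top + 1)]
--     for i, s in enumerate(scores):
--         buckets[s].append(i)
--     out = []
--     for bucket in reversed(buckets):
--         out += bucket
--     return out
-- ===== Notes on version B (the rewrite author's own statement) =====
-- stated objective: alternative
-- what changed: replaces the comparison sort of (index, score) pairs by a stable counting/bucket sort: indices are dropped into buckets keyed by their integer score and read out from the highest score down
import Mathlib
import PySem

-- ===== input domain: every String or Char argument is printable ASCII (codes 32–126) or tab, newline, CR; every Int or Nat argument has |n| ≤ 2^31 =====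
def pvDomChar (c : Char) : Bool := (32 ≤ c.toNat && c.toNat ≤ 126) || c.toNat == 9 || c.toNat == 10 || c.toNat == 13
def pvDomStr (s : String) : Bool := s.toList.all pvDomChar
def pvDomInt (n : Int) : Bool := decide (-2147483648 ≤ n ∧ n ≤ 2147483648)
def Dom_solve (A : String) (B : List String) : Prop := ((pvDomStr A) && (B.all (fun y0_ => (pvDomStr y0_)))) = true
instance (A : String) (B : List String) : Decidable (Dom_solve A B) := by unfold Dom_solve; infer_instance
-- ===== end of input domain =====

-- B replaces A's comparison sort of (index, score) pairs by a stable bucket (counting) sort on the integer score.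

-- ===== PORT A =====
-- s.split("_"): the separator is nonempty, so PySem.Str.split? is always `some` and the default is never used
def pySplitU (s : String) : List String := (PySem.Str.split? s "_").getD []

def solve (A : String) (B : List String) : List Int :=
  let keys := pySplitU A
  let keywords : PySem.Set String := keys.foldl PySem.Set.add PySem.Set.empty
  let good_reviews : List (Int × Int) :=
    (PySem.List.enumerate B).foldl (fun acc iw =>
      let score : Int := (pySplitU iw.2).foldl
        (fun sc w => if PySem.Set.contains keywords w then sc + 1 else sc) 0
      acc ++ [(iw.1, score)]) []
  let sortedReviews := PySem.List.sorted good_reviews (fun x => x.2) true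
  sortedReviews.foldl (fun acc p => acc ++ [p.1]) []

-- ===== PORT B =====
def solve_alt (A : String) (B : List String) : List Int :=
  let keywords : PySem.Set String := PySem.Set.ofList (pySplitU A)
  let scores : List Int := B.map (fun review =>
    ((pySplitU review).map
      (fun w => if PySem.Set.contains keywords w then (1 : Int) else 0)).sum)
  let top : Int := PySem.List.maxD scores (fun x => x) 0
  -- scores are counts, hence 0 ≤ s ≤ top: 'buckets[s]' is ported with the exact index s.toNat
  let buckets0 : List (List Int) := List.replicate (top + 1).toNat []
  let buckets := (PySem.List.enumerate scores).foldl
    (fun acc p => acc.modify p.2.toNat (· ++ [p.1])) buckets0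
  buckets.reverse.foldl (fun acc b => acc ++ b) []

-- ===== PRECONDITION & SPEC =====
def Spec_solve (A : String) (B : List String) (out : List Int) : Prop := out = solve_alt A B
instance (A : String) (B : List String) (out : List Int) : Decidable (Spec_solve A B out) := by unfold Spec_solve; infer_instance

-- ===== CLAIM (what is proved, stated in full; the proofs are below) =====
def Claim_equal_solve : Prop := ∀ (A : String) (B : List String), Dom_solve A B → Spec_solve A B (solve A B)

-- ===== LEMMAS AND PROOFS =====

-- insertBy puts x in front when every element compares 'before'
theorem insertBy_eq_cons {α : Type} (before : α → α → Bool) (x : α) (ys : List α)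
    (h : ∀ y ∈ ys, before x y = true) :
    PySem.List.insertBy before x ys = x :: ys := by
  cases ys with
  | nil => rfl
  | cons y t => simp [PySem.List.insertBy, h y (by simp)]

-- insertBy walks past a prefix on which 'before' fails
theorem insertBy_append_left {α : Type} (before : α → α → Bool) (x : α) (as bs : List α)
    (h : ∀ y ∈ as, before x y = false) :
    PySem.List.insertBy before x (as ++ bs) = as ++ PySem.List.insertBy before x bs := by
  induction as with
  | nil => rfl
  | cons a t ih =>
      simp only [List.cons_append, PySem.List.insertBy, h a (by simp)]
      simp only [Bool.false_eq_true, if_false, List.cons.injEq, true_and]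
      exact ih (fun y hy => h y (by simp [hy]))

-- inserting into a list grouped by strictly descending score lands at the end of its own group
theorem insert_grouped (S : List Int) (hS : S.Pairwise (· > ·))
    (g : Int → List (Int × Int)) (hg : ∀ s, ∀ y ∈ g s, y.2 = s)
    (x : Int × Int) (hx : x.2 ∈ S) :
    PySem.List.insertBy (fun a b => decide ((b.2 : Int) < a.2)) x (S.flatMap g)
      = S.flatMap (fun s => if s = x.2 then g s ++ [x] else g s) := by
  induction S with
  | nil => simp at hx
  | cons s S' ih =>
      have hgt : ∀ t ∈ S', s > t := (List.pairwise_cons.mp hS).1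
      have hS' : S'.Pairwise (· > ·) := (List.pairwise_cons.mp hS).2
      by_cases hsx : s = x.2
      · -- x goes right after the group of score s = x.2
        rw [List.flatMap_cons,
            insertBy_append_left _ _ _ _ (fun y hy => by simp [hg s y hy, hsx]),
            insertBy_eq_cons _ _ _ (fun y hy => by
              obtain ⟨t, ht, hyt⟩ := List.mem_flatMap.mp hy
              have h1 := hg t y hyt
              have h2 := hgt t ht
              simp [h1]; omega)]
        have hcong : S'.flatMap (fun u => if u = x.2 then g u ++ [x] else g u)
            = S'.flatMap g := by
          apply List.flatMap_congr
          intro u hu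
          have h2 := hgt u hu
          have : u ≠ x.2 := by omega
          simp [this]
        simp [List.flatMap_cons, hcong, hsx]
      · -- skip the whole group of score s > x.2
        have hx' : x.2 ∈ S' := by
          rcases List.mem_cons.mp hx with h | h
          · exact absurd h.symm hsx
          · exact h
        have hgts : s > x.2 := hgt _ hx'
        rw [List.flatMap_cons,
            insertBy_append_left _ _ _ _ (fun y hy => by
              have := hg s y hy; simp [this]; omega),
            ih hS' hx']
        simp [hsx]

-- the whole insertion-sort fold over a grouped accumulator
theorem foldl_insert_grouped (S : List Int) (hS : S.Pairwise (· > ·)) :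
    ∀ (xs : List (Int × Int)) (g : Int → List (Int × Int)),
      (∀ x ∈ xs, x.2 ∈ S) → (∀ s, ∀ y ∈ g s, y.2 = s) →
      xs.foldl (fun acc x => PySem.List.insertBy (fun a b => decide ((b.2 : Int) < a.2)) x acc)
          (S.flatMap g)
        = S.flatMap (fun s => g s ++ xs.filter (fun x => x.2 == s)) := by
  intro xs
  induction xs with
  | nil => intro g _ _; simp
  | cons x t ih =>
      intro g hxs hg
      rw [List.foldl_cons, insert_grouped S hS g hg x (hxs x (by simp))]
      rw [ih _ (fun y hy => hxs y (by simp [hy]))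
            (fun s y hy => by
              by_cases h : s = x.2
              · rw [if_pos h] at hy
                rcases List.mem_append.mp hy with hy | hy
                · exact hg s y hy
                · simp at hy; simp [hy, h]
              · rw [if_neg h] at hy
                exact hg s y hy)]
      apply List.flatMap_congr
      intro s _
      by_cases h : x.2 = s
      · rw [if_pos h.symm, List.filter_cons, if_pos (by simp [h])]
        simp
      · rw [if_neg (fun hh => h hh.symm), List.filter_cons, if_neg (by simp [h])]

-- Python's stable reverse sort by score is exactly the descending-bucket readout
theorem sorted_rev_grouped (xs : List (Int × Int)) (S : List Int) (hS : S.Pairwise (· > ·))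
    (hxs : ∀ x ∈ xs, x.2 ∈ S) :
    PySem.List.sorted xs (fun x => x.2) true
      = S.flatMap (fun s => xs.filter (fun x => x.2 == s)) := by
  rw [PySem.List.sorted_rev_eq_foldl_insertBy]
  have h0 : ([] : List (Int × Int)) = S.flatMap (fun _ => ([] : List (Int × Int))) := by simp
  rw [h0, foldl_insert_grouped S hS xs _ hxs (by simp)]
  simp

-- List.modify acting on a map over range
theorem modify_map_range (n k : Nat) (g : Nat → List Int) (f : List Int → List Int) :
    ((List.range n).map g).modify k f
      = (List.range n).map (fun s => if s = k then f (g s) else g s) := by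
  apply List.ext_getElem
  · simp
  · intro j h1 h2
    simp only [List.getElem_modify, List.getElem_map, List.getElem_range]
    by_cases h : k = j <;> simp [h]
    exact fun hh => absurd hh.symm h

-- the bucket-filling loop, characterised bucket by bucket
theorem buckets_fold (n : Nat) :
    ∀ (ps : List (Int × Int)) (g : Nat → List Int),
      (∀ p ∈ ps, 0 ≤ p.2 ∧ p.2.toNat < n) →
      ps.foldl (fun acc p => acc.modify p.2.toNat (· ++ [p.1])) ((List.range n).map g)
        = (List.range n).map
            (fun s => g s ++ (ps.filter (fun p => p.2 == (s : Int))).map (·.1)) := by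
  intro ps
  induction ps with
  | nil => intro g _; simp
  | cons p t ih =>
      intro g hp
      have hp0 := hp p (by simp)
      rw [List.foldl_cons, modify_map_range n p.2.toNat g (· ++ [p.1]),
          ih _ (fun q hq => hp q (by simp [hq]))]
      apply List.map_congr_left
      intro s hs
      by_cases h : p.2 = (s : Int)
      · have hsn : s = p.2.toNat := by omega
        rw [if_pos hsn, List.filter_cons, if_pos (by simp [h])]
        simp
      · have h2 : ¬ s = p.2.toNat := by omega
        rw [if_neg h2, List.filter_cons, if_neg (by simp [h])]

-- enumerating a mapped list
theorem enumerate_map {α β : Type} (f : α → β) (xs : List α) (s : Int) :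
    PySem.List.enumerate (xs.map f) s
      = (PySem.List.enumerate xs s).map (fun p => (p.1, f p.2)) := by
  induction xs generalizing s with
  | nil => rfl
  | cons x t ih => simp [PySem.List.enumerate_cons, ih]

-- every score is nonnegative and bounded by 'top'
theorem scores_bounds (scores : List Int) (h0 : ∀ s ∈ scores, 0 ≤ s) :
    ∀ s ∈ scores, 0 ≤ s ∧ s.toNat < (PySem.List.maxD scores (fun x => x) 0 + 1).toNat := by
  intro s hs
  have hne : scores ≠ [] := by rintro rfl; simp at hs
  refine ⟨h0 s hs, ?_⟩
  unfold PySem.List.maxD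
  cases hm : PySem.List.max? scores (fun x => x) with
  | none => exact absurd ((PySem.List.max?_eq_none_iff _ _).mp hm) hne
  | some m =>
      have := PySem.List.max?_isMax hm s hs
      have hs0 := h0 s hs
      simp only [Option.getD_some]
      omega

-- the strictly descending score list 'top, top-1, …, 0'
theorem range_rev_pairwise (n : Nat) :
    (((List.range n).reverse).map (fun s : Nat => (s : Int))).Pairwise (· > ·) := by
  rw [List.pairwise_map]
  refine List.pairwise_reverse.mpr ((List.pairwise_lt_range).imp ?_)
  intro a b h
  exact_mod_cast h

-- the bridge: the sorted-pairs extraction equals the bucket readout, for any nonnegative score map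
theorem sorted_eq_buckets (scf : String → Int) (h0 : ∀ r, 0 ≤ scf r) (B : List String) :
    List.map Prod.fst
      (PySem.List.sorted ((PySem.List.enumerate B).map (fun x => (x.1, scf x.2)))
        (fun x => x.2) true)
      = (List.foldl (fun acc p => acc.modify p.2.toNat (fun b => b ++ [p.1]))
          (List.replicate (PySem.List.maxD (B.map scf) (fun x => x) 0 + 1).toNat [])
          ((PySem.List.enumerate B).map (fun x => (x.1, scf x.2)))).reverse.flatten := by
  set n : Nat := (PySem.List.maxD (B.map scf) (fun x => x) 0 + 1).toNat with hn
  have hb : ∀ s ∈ B.map scf, 0 ≤ s ∧ s.toNat < n :=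
    scores_bounds _ (fun s hs => by obtain ⟨r, _, rfl⟩ := List.mem_map.mp hs; exact h0 r)
  have hmem2 : ∀ x ∈ (PySem.List.enumerate B).map (fun q => (q.1, scf q.2)),
      0 ≤ x.2 ∧ x.2.toNat < n := by
    intro x hx
    obtain ⟨q, hq, rfl⟩ := List.mem_map.mp hx
    have hqB : q.2 ∈ B := by
      obtain ⟨k, hk, rfl⟩ := (PySem.List.mem_enumerate_iff _ _ _).mp hq
      simp
    exact hb _ (List.mem_map.mpr ⟨q.2, hqB, rfl⟩)
  have hmem : ∀ x ∈ (PySem.List.enumerate B).map (fun q => (q.1, scf q.2)),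
      x.2 ∈ ((List.range n).reverse).map (fun s : Nat => (s : Int)) := by
    intro x hx
    have h2 := hmem2 x hx
    exact List.mem_map.mpr ⟨x.2.toNat,
      by rw [List.mem_reverse, List.mem_range]; exact h2.2, Int.toNat_of_nonneg h2.1⟩
  rw [sorted_rev_grouped _ _ (range_rev_pairwise n) hmem,
      show List.replicate n ([] : List Int) = (List.range n).map (fun _ => []) from by simp,
      buckets_fold n _ (fun _ => []) hmem2]
  simp only [List.nil_append, List.map_flatMap, List.flatMap_map, ← List.map_reverse,
    ← List.flatMap_def]

-- ===== VERDICT (by name: the statement is the Claim_ definition above) =====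
theorem solve_spec : Claim_equal_solve := by
  intro A B _
  unfold Spec_solve solve solve_alt
  -- A's keyword-building fold is Set.ofList; both scoring loops are the same keyword count
  simp only []
  have hset : (pySplitU A).foldl PySem.Set.add PySem.Set.empty = PySem.Set.ofList (pySplitU A) := by
    rw [PySem.Set.ofList_eq_foldl]; rfl
  rw [hset]
  simp only [PySem.List.foldl_if_add_one, PySem.List.sum_map_ite_one_zero, zero_add,
    PySem.List.foldl_append_singleton_eq_map, List.nil_append, enumerate_map,
    PySem.List.foldl_append_eq_flatten]
  exact sorted_eq_buckets
    (fun r => ((pySplitU r).countP (PySem.Set.ofList (pySplitU A)).contains : Int))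
    (fun r => Int.natCast_nonneg _) B
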